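-- pv_equiv track=rewrite | github.com/macearle/206_final | itunes.py | all_data
-- ===== SOURCE A (Python) =====
-- def all_data(songinfo, genres):
--     """
--     This function creates a list of tuples, one for each song that has all of the song's information,
--     creating the song's rank with a count and creating the tuple with the song title, artistname, year released
--     and rank.
--     """
--     data = []
--     rank = 1
--     for songs in genres:
--         song = songs[0]
--         genre = songs[1]
--         for item in songinfo:
--             if song == item[0]:
--                 artistname = item[1]
--                 year = item[2]
--         data.append((song, genre, artistname,year, rank))
--         rank += 1
--     return data
-- ===== SOURCE B (Python) =====
-- def all_data(songinfo, genres):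
--     """Inverted join: index the genre list by title, then stream songinfo once,
--     writing each song's (artist, year) into every rank slot bearing that title
--     (later entries overwrite earlier ones); finally emit the ranked rows."""
--     slots = {}
--     for i, (song, _) in enumerate(genres):
--         slots.setdefault(song, []).append(i)
--     found = [None] * len(genres)
--     for title, artist, year in songinfo:
--         for i in slots.get(title, ()):
--             found[i] = (artist, year)
--     return [(song, genre, artist, year, i + 1)
--             for i, ((song, genre), (artist, year)) in enumerate(zip(genres, found))]
-- ===== Notes on version B (the rewrite author's own statement) =====
-- stated objective: alternative
-- what changed: B inverts the join: it indexes the genre list by title (title -> list of rank positions), then streams songinfo once writing each song's (artist, year) into all of its positions (later entries overwrite), and emits the ranked rows; Pre_ excludes unmatched genre titles, on which A either raises NameError (first title) or returns a stale (artist, year) leftover from the previous iteration (later titles) while B raises TypeError unpacking the never-written None slot.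
import Mathlib
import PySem

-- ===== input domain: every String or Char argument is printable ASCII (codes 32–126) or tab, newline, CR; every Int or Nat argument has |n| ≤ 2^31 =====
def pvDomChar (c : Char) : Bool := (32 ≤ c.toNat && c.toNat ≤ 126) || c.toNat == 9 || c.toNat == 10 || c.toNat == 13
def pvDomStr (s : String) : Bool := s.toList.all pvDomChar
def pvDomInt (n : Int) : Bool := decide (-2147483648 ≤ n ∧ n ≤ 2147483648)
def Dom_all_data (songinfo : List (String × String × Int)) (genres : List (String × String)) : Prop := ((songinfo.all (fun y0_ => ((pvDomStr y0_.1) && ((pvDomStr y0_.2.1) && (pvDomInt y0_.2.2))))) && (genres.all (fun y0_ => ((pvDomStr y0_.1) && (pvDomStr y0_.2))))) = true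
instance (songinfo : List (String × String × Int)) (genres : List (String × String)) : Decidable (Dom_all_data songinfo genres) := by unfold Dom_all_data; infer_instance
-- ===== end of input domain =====

-- B is an inverted join (index genres by title, stream songinfo once writing into rank slots) instead of A's per-genre rescan of songinfo; equal return value on Pre_.


-- ===== PORT A =====
-- A's state: the growing data list, the rank counter, and the (possibly still
-- unbound) pair (artistname, year), modelled as an Option; the inner 'for item
-- in songinfo' loop is the inner foldl.  Pre_ guarantees the Option is 'some'
-- whenever A reads it (Python raises NameError otherwise), so '.getD ("", 0)'
-- is never the value used inside Pre_.
def all_data (songinfo : List (String × String × Int)) (genres : List (String × String)) : List (String × String × String × Int × Int) :=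
  (genres.foldl
    (fun (st : List (String × String × String × Int × Int) × Int × Option (String × Int)) songs =>
      let song := songs.1
      let genre := songs.2
      let av := songinfo.foldl
        (fun av item => if song == item.1 then some (item.2.1, item.2.2) else av) st.2.2
      let p := av.getD ("", 0)
      (st.1 ++ [(song, genre, p.1, p.2, st.2.1)], st.2.1 + 1, av))
    ([], 1, none)).1

-- ===== PORT B =====
-- B: slots maps each title to the list of positions holding it in genres
-- (dict of lists, built with setdefault/append); one pass over songinfo then
-- writes each song's (artist, year) into all of its slots (found[i] = …);
-- finally the rows are emitted from zip(genres, found) with enumerate ranks.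
-- found holds Option pairs (None until written); B's Python raises on the
-- unpack of a still-None entry, which Pre_ excludes, so '.getD' totalises.
def all_data_alt (songinfo : List (String × String × Int)) (genres : List (String × String)) : List (String × String × String × Int × Int) :=
  let slots : PySem.Dict String (List Int) :=
    (PySem.List.enumerate genres).foldl
      (fun d ig => d.insert ig.2.1 (d.getD ig.2.1 [] ++ [ig.1])) PySem.Dict.empty
  let found : List (Option (String × Int)) :=
    songinfo.foldl
      (fun f item =>
        (slots.getD item.1 []).foldl
          (fun f i => PySem.List.pySetD f i (some (item.2.1, item.2.2))) f)
      (List.replicate genres.length none)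
  (PySem.List.enumerate (genres.zip found)).map
    (fun x =>
      let p := x.2.2.getD ("", 0)
      (x.2.1.1, x.2.1.2, p.1, p.2, x.1 + 1))

-- ===== PRECONDITION & SPEC =====
-- Pre_ excludes exactly the unmatched-title inputs on which one of the two
-- Pythons raises: A raises NameError when the FIRST genre title has no match
-- in songinfo, and B raises TypeError (unpacking None) on ANY unmatched genre
-- title; on the inputs in between (a later title unmatched) A returns a value
-- that merely repeats the previous iteration's leftover (artist, year) — an
-- accident of loop-variable scope that B's algorithm has no counterpart for.
def Pre_all_data (songinfo : List (String × String × Int)) (genres : List (String × String)) : Prop :=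
  (genres.all (fun g => songinfo.any (fun it => it.1 == g.1))) = true
instance (songinfo : List (String × String × Int)) (genres : List (String × String)) : Decidable (Pre_all_data songinfo genres) := by unfold Pre_all_data; infer_instance
def pvWitness_all_data : (List (String × String × Int)) × (List (String × String)) :=
  ([("a", "X", 1), ("b", "Y", 2)], [("a", "pop"), ("b", "rock")])
def Spec_all_data (songinfo : List (String × String × Int)) (genres : List (String × String)) (out : List (String × String × String × Int × Int)) : Prop := out = all_data_alt songinfo genres
instance (songinfo : List (String × String × Int)) (genres : List (String × String)) (out : List (String × String × String × Int × Int)) : Decidable (Spec_all_data songinfo genres out) := by unfold Spec_all_data; infer_instance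

-- ===== CLAIM (what is proved, stated in full; the proofs are below) =====
def Claim_equal_all_data : Prop := ∀ (songinfo : List (String × String × Int)) (genres : List (String × String)), Dom_all_data songinfo genres → Pre_all_data songinfo genres → Spec_all_data songinfo genres (all_data songinfo genres)

-- ===== LEMMAS AND PROOFS =====

-- the last match of `song` in `songinfo`, as A's inner loop computes it from init none
def pvLast (songinfo : List (String × String × Int)) (song : String) : Option (String × Int) :=
  songinfo.foldl (fun av item => if song == item.1 then some (item.2.1, item.2.2) else av) none

-- the common shape both programs are reduced to: one ranked row per genre
def pvSpec (songinfo : List (String × String × Int)) : List (String × String) → Int → List (String × String × String × Int × Int)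
  | [], _ => []
  | g :: gs, r =>
    let p := (pvLast songinfo g.1).getD ("", 0)
    (g.1, g.2, p.1, p.2, r) :: pvSpec songinfo gs (r + 1)

-- the positions of title t in genres, as B's slots dict records them
def pvIdxs (genres : List (String × String)) (t : String) : List Int :=
  (PySem.List.enumerate genres).filterMap (fun p => if p.2.1 = t then some p.1 else none)

-- A's inner loop from an arbitrary start equals the last match, falling back to the start
theorem pvInner_eq (songinfo : List (String × String × Int)) (song : String)
    (av0 : Option (String × Int)) :
    songinfo.foldl (fun av item => if song == item.1 then some (item.2.1, item.2.2) else av) av0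
      = match pvLast songinfo song with
        | some v => some v
        | none => av0 := by
  induction songinfo generalizing av0 with
  | nil => simp [pvLast]
  | cons x xs ih =>
    simp only [pvLast, List.foldl_cons]
    rw [ih (if song == x.1 then some (x.2.1, x.2.2) else av0),
        ih (if song == x.1 then some (x.2.1, x.2.2) else none)]
    simp only [pvLast]
    cases h : xs.foldl (fun av item => if song == item.1 then some (item.2.1, item.2.2) else av) none with
    | some v => rfl
    | none => by_cases hc : (song == x.1) = true <;> simp [hc]

-- a matched title has a 'some' last match
theorem pvLast_isSome (songinfo : List (String × String × Int)) (song : String)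
    (h : songinfo.any (fun it => it.1 == song) = true) : (pvLast songinfo song).isSome := by
  induction songinfo with
  | nil => simp at h
  | cons x xs ih =>
    simp only [pvLast, List.foldl_cons]
    rw [pvInner_eq xs song (if song == x.1 then some (x.2.1, x.2.2) else none)]
    simp only [List.any_cons, Bool.or_eq_true] at h
    cases hl : pvLast xs song with
    | some v => simp
    | none =>
      rcases h with h | h
      · have hx : x.1 = song := by simpa using h
        simp [hx]
      · have := ih h; simp [hl] at this

-- A's outer fold, from any state, appends pvSpec rows (all titles matched)
theorem pvA_fold (songinfo : List (String × String × Int)) (genres : List (String × String))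
    (data : List (String × String × String × Int × Int)) (r : Int) (av0 : Option (String × Int))
    (h : ∀ g ∈ genres, songinfo.any (fun it => it.1 == g.1) = true) :
    (genres.foldl
      (fun (st : List (String × String × String × Int × Int) × Int × Option (String × Int)) songs =>
        let song := songs.1
        let genre := songs.2
        let av := songinfo.foldl
          (fun av item => if song == item.1 then some (item.2.1, item.2.2) else av) st.2.2
        let p := av.getD ("", 0)
        (st.1 ++ [(song, genre, p.1, p.2, st.2.1)], st.2.1 + 1, av))
      (data, r, av0)).1 = data ++ pvSpec songinfo genres r := by
  induction genres generalizing data r av0 with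
  | nil => simp [pvSpec]
  | cons g gs ih =>
    simp only [List.foldl_cons]
    rw [pvInner_eq songinfo g.1 av0]
    have hg := pvLast_isSome songinfo g.1 (h g (by simp))
    obtain ⟨v, hv⟩ := Option.isSome_iff_exists.mp hg
    simp only [hv]
    rw [ih _ _ _ (fun g hgm => h g (by simp [hgm]))]
    simp [pvSpec, hv]

-- B's slots dict: lookup of t returns the positions of t, after the start dict's entry
theorem pvSlots_getD (gsE : List (Int × (String × String))) (d : PySem.Dict String (List Int)) (t : String) :
    ((gsE.foldl (fun d ig => d.insert ig.2.1 (d.getD ig.2.1 [] ++ [ig.1])) d).getD t [])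
      = d.getD t [] ++ gsE.filterMap (fun p => if p.2.1 = t then some p.1 else none) := by
  induction gsE generalizing d with
  | nil => simp
  | cons p rest ih =>
    simp only [List.foldl_cons, List.filterMap_cons]
    rw [ih]
    by_cases hc : p.2.1 = t
    · rw [hc, PySem.Dict.getD_insert_self]; simp
    · rw [PySem.Dict.getD_insert_of_ne _ _ _ (fun h => hc h.symm)]; simp [hc]

-- membership in the slots of t: exactly the positions j with genres[j].1 = t
theorem pvMem_enumerate {α : Type} (l : List α) (s : Int) (p : Int × α) :
    p ∈ PySem.List.enumerate l s ↔ ∃ k : Nat, l[k]? = some p.2 ∧ p.1 = s + k := by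
  induction l generalizing s with
  | nil => simp [PySem.List.enumerate]
  | cons x xs ih =>
    rw [PySem.List.enumerate_cons]
    simp only [List.mem_cons, ih]
    constructor
    · rintro (rfl | ⟨k, hk, hp⟩)
      · exact ⟨0, by simp⟩
      · exact ⟨k + 1, by simpa using hk, by omega⟩
    · rintro ⟨k, hk, hp⟩
      cases k with
      | zero =>
        left
        obtain ⟨a, b⟩ := p
        simp only [List.getElem?_cons_zero, Option.some_inj] at hk
        simp only [Nat.cast_zero, add_zero] at hp
        simp [hp, hk]
      | succ k =>
        right
        exact ⟨k, by simpa using hk, by omega⟩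

theorem pvMem_idxs (genres : List (String × String)) (t : String) (j : Nat) :
    ((j : Int) ∈ pvIdxs genres t) ↔ ∃ g, genres[j]? = some g ∧ g.1 = t := by
  unfold pvIdxs
  rw [List.mem_filterMap]
  constructor
  · rintro ⟨p, hp, hf⟩
    by_cases hc : p.2.1 = t
    · simp only [hc, if_true, Option.some_inj] at hf
      rw [pvMem_enumerate] at hp
      obtain ⟨k, hk, hk1⟩ := hp
      have : k = j := by omega
      exact ⟨p.2, by rwa [← this], hc⟩
    · simp [hc] at hf
  · rintro ⟨g, hg, hgt⟩
    refine ⟨((j : Int), g), ?_, by simp [hgt]⟩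
    rw [pvMem_enumerate]
    exact ⟨j, by simpa using hg, by omega⟩

-- idxs are nonnegative
theorem pvIdxs_nonneg (genres : List (String × String)) (t : String) (i : Int)
    (h : i ∈ pvIdxs genres t) : 0 ≤ i := by
  unfold pvIdxs at h
  rw [List.mem_filterMap] at h
  obtain ⟨p, hp, hf⟩ := h
  by_cases hc : p.2.1 = t
  · simp only [hc, if_true, Option.some_inj] at hf
    rw [pvMem_enumerate] at hp
    obtain ⟨k, _, hk⟩ := hp
    omega
  · simp [hc] at hf

-- a fold of writes at the positions in l, read back at j
theorem pvSetFold_getElem? {β : Type} (l : List Int) (f : List β) (v : β) (j : Nat)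
    (hnn : ∀ i ∈ l, 0 ≤ i) :
    ((l.foldl (fun f i => PySem.List.pySetD f i v) f)[j]?)
      = if (j : Int) ∈ l ∧ j < f.length then some v else f[j]? := by
  induction l generalizing f with
  | nil => simp
  | cons i rest ih =>
    simp only [List.foldl_cons]
    have hi : (0:Int) ≤ i := hnn i (by simp)
    rw [PySem.List.pySetD_of_nonneg _ _ hi]
    rw [ih _ (fun i h => hnn i (by simp [h]))]
    simp only [List.length_set, List.getElem?_set, List.mem_cons]
    by_cases hm : (j : Int) ∈ rest
    · by_cases hj : j < f.length
      · simp [hm, hj]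
      · simp [hm, hj]
        omega
    · by_cases he : i.toNat = j
      · have hij : (j : Int) = i := by omega
        by_cases hj : j < f.length <;> simp [he, hj, hij]
      · have hij : ¬ ((j : Int) = i) := by omega
        by_cases hj : j < f.length <;> simp [hm, he, hj, hij]

theorem pvSetFold_length {β : Type} (l : List Int) (f : List β) (v : β) :
    (l.foldl (fun f i => PySem.List.pySetD f i v) f).length = f.length := by
  induction l generalizing f with
  | nil => rfl
  | cons i rest ih => simp only [List.foldl_cons]; rw [ih, PySem.List.length_pySetD]

-- B's found pass: entry j ends as the last songinfo match for genres[j].1, start f[j] as fallback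
theorem pvFound (genres : List (String × String)) (P : List (String × String × Int))
    (f : List (Option (String × Int))) (hlen : f.length = genres.length)
    (j : Nat) (hj : j < genres.length) :
    ((P.foldl
        (fun f item =>
          (pvIdxs genres item.1).foldl
            (fun f i => PySem.List.pySetD f i (some (item.2.1, item.2.2))) f)
        f)[j]?)
      = some (P.foldl (fun av item => if (genres[j]).1 == item.1 then some (item.2.1, item.2.2) else av)
              (f[j]'(by omega))) := by
  induction P generalizing f with
  | nil => simp [List.getElem?_eq_getElem (by omega : j < f.length)]
  | cons x P ih =>
    simp only [List.foldl_cons]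
    set f' := (pvIdxs genres x.1).foldl (fun f i => PySem.List.pySetD f i (some (x.2.1, x.2.2))) f with hf'
    have hlen' : f'.length = genres.length := by rw [hf', pvSetFold_length, hlen]
    have hjf : j < f.length := by omega
    have hjf' : j < f'.length := by omega
    rw [ih f' hlen']
    have hget : f'[j]? = if (j : Int) ∈ pvIdxs genres x.1 ∧ j < f.length then some (some (x.2.1, x.2.2)) else f[j]? := by
      rw [hf']; exact pvSetFold_getElem? _ f _ j (pvIdxs_nonneg genres x.1)
    have hinit : f'[j] = if (genres[j]).1 == x.1 then some (x.2.1, x.2.2) else f[j] := by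
      by_cases hm : (j : Int) ∈ pvIdxs genres x.1
      · obtain ⟨g, hg, hgt⟩ := (pvMem_idxs genres x.1 j).mp hm
        rw [List.getElem?_eq_getElem hj] at hg
        have hgeq : genres[j] = g := Option.some.inj hg
        have hbeq : ((genres[j]).1 == x.1) = true := by simp [hgeq, hgt]
        rw [if_pos ⟨hm, hjf⟩] at hget
        rw [List.getElem?_eq_getElem hjf'] at hget
        simp [hbeq, Option.some.inj hget]
      · have hbeq : ((genres[j]).1 == x.1) = false := by
          rw [beq_eq_false_iff_ne]
          intro hc
          exact hm ((pvMem_idxs genres x.1 j).mpr ⟨genres[j], List.getElem?_eq_getElem hj, hc⟩)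
        rw [if_neg (fun h => hm h.1)] at hget
        rw [List.getElem?_eq_getElem hjf', List.getElem?_eq_getElem hjf] at hget
        simp [hbeq, Option.some.inj hget]
    rw [hinit]

-- emitting rows from zip(genres, found) is pvSpec, when found holds the last matches
theorem pvEmit (songinfo : List (String × String × Int)) :
    ∀ (gs : List (String × String)) (fs : List (Option (String × Int))) (s : Int),
    fs.length = gs.length →
    (∀ (j : Nat) (hj : j < gs.length), fs[j]? = some (pvLast songinfo ((gs[j]'hj).1))) →
    (PySem.List.enumerate (gs.zip fs) s).map
      (fun x =>
        let p := x.2.2.getD ("", 0)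
        (x.2.1.1, x.2.1.2, p.1, p.2, x.1 + 1))
      = pvSpec songinfo gs (s + 1) := by
  intro gs
  induction gs with
  | nil => intro fs s _ _; simp [pvSpec]
  | cons g gs ih =>
    intro fs s hlen hsp
    cases fs with
    | nil => simp at hlen
    | cons f0 fs =>
      simp only [List.zip_cons_cons, PySem.List.enumerate_cons, List.map_cons]
      have h0 := hsp 0 (by simp)
      simp only [List.getElem?_cons_zero, Option.some_inj, List.getElem_cons_zero] at h0
      rw [ih fs (s + 1) (by simpa using hlen)
          (fun j hj => by
            have := hsp (j + 1) (by simpa using Nat.succ_lt_succ hj)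
            simpa using this)]
      simp [pvSpec, h0]

-- length is preserved through B's found pass
theorem pvFound_length (genres : List (String × String)) (P : List (String × String × Int))
    (f : List (Option (String × Int))) :
    (P.foldl
        (fun f item =>
          (pvIdxs genres item.1).foldl
            (fun f i => PySem.List.pySetD f i (some (item.2.1, item.2.2))) f)
        f).length = f.length := by
  induction P generalizing f with
  | nil => rfl
  | cons x P ih => simp only [List.foldl_cons]; rw [ih, pvSetFold_length]

-- ===== VERDICT (by name: the statement is the Claim_ definition above) =====
theorem all_data_spec : Claim_equal_all_data := by
  intro songinfo genres _ hpre
  unfold Spec_all_data all_data all_data_alt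
  unfold Pre_all_data at hpre
  simp only [List.all_eq_true] at hpre
  rw [pvA_fold songinfo genres [] 1 none (fun g hg => hpre g hg)]
  have hslots : ∀ t, ((PySem.List.enumerate genres).foldl
      (fun d ig => d.insert ig.2.1 (d.getD ig.2.1 [] ++ [ig.1]))
      (PySem.Dict.empty : PySem.Dict String (List Int))).getD t [] = pvIdxs genres t := by
    intro t
    rw [pvSlots_getD]
    simp [pvIdxs, PySem.Dict.getD, PySem.Dict.get?_empty]
  simp only [hslots, List.nil_append]
  rw [pvEmit songinfo genres _ 0
    (by rw [pvFound_length]; simp)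
    (by
      intro j hj
      rw [pvFound genres songinfo _ (by simp) j hj]
      simp [pvLast])]
  norm_num
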